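-- pv_equiv track=rewrite | github.com/MartinA-Gm/Kegg2BiGG | src/kegg/fetch_compound.py | parse_kegg_response
-- ===== SOURCE A (Python) =====
-- from typing import Dict, List, Optional, Union
--
-- def parse_kegg_response(response_text: str) -> Dict[str, Union[str, List[str]]]:
--     """Parse KEGG API response into structured data.
--
--     Args:
--         response_text: Raw response text from KEGG API.
--
--     Returns:
--         Dictionary containing parsed compound information.
--     """
--     data = {
--         'compound_id': '',
--         'name': '',
--         'formula': '',
--         'exact_mass': '',
--         'molecular_weight': '',
--         'reactions': '',
--         'enzymes': '',
--         'pathways': '',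
--         'modules': '',
--         'dblinks': ''
--     }
--
--     current_section = None
--     for line in response_text.split('\n'):
--         if not line.strip():
--             continue
--
--         if line.startswith(' '):
--             # Continuation of previous section
--             if current_section == 'NAME':
--                 data['name'] += ' ' + line.strip()
--             elif current_section == 'FORMULA':
--                 data['formula'] += ' ' + line.strip()
--             elif current_section == 'EXACT_MASS':
--                 data['exact_mass'] += ' ' + line.strip()
--             elif current_section == 'MOL_WEIGHT':
--                 data['molecular_weight'] += ' ' + line.strip()
--             elif current_section == 'REACTION':
--                 data['reactions'] += ' ' + line.strip()
--             elif current_section == 'ENZYME':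
--                 data['enzymes'] += ' ' + line.strip()
--             elif current_section == 'PATHWAY':
--                 data['pathways'] += ' ' + line.strip()
--             elif current_section == 'MODULE':
--                 data['modules'] += ' ' + line.strip()
--             elif current_section == 'DBLINKS':
--                 data['dblinks'] += ' ' + line.strip()
--         else:
--             # New section
--             if ' ' in line:
--                 section, content = line.split(' ', 1)
--                 current_section = section
--
--                 if section == 'ENTRY':
--                     data['compound_id'] = content.split()[0]
--                 elif section == 'NAME':
--                     data['name'] = content.strip()
--                 elif section == 'FORMULA':
--                     data['formula'] = content.strip()
--                 elif section == 'EXACT_MASS':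
--                     data['exact_mass'] = content.strip()
--                 elif section == 'MOL_WEIGHT':
--                     data['molecular_weight'] = content.strip()
--                 elif section == 'REACTION':
--                     data['reactions'] = content.strip()
--                 elif section == 'ENZYME':
--                     data['enzymes'] = content.strip()
--                 elif section == 'PATHWAY':
--                     data['pathways'] = content.strip()
--                 elif section == 'MODULE':
--                     data['modules'] = content.strip()
--                 elif section == 'DBLINKS':
--                     data['dblinks'] = content.strip()
--
--     return data
-- ===== SOURCE B (Python) =====
-- SECTION_KEYS = {
--     'NAME': 'name',
--     'FORMULA': 'formula',
--     'EXACT_MASS': 'exact_mass',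
--     'MOL_WEIGHT': 'molecular_weight',
--     'REACTION': 'reactions',
--     'ENZYME': 'enzymes',
--     'PATHWAY': 'pathways',
--     'MODULE': 'modules',
--     'DBLINKS': 'dblinks',
-- }
--
--
-- def _parse_blocks(lines, data):
--     """Recursive descent over header blocks: lines starts with a header line
--     (or is empty); consume the header plus its run of indented continuation
--     lines as one record, evaluate it, recurse on the tail."""
--     if not lines:
--         return
--     header, rest = lines[0], lines[1:]
--     k = 0
--     while k < len(rest) and rest[k].startswith(' '):
--         k += 1
--     section, content = header.split(' ', 1)
--     if section == 'ENTRY':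
--         data['compound_id'] = content.split()[0]
--     elif section in SECTION_KEYS:
--         data[SECTION_KEYS[section]] = ' '.join(
--             [content.strip()] + [l.strip() for l in rest[:k]])
--     _parse_blocks(rest[k:], data)
--
--
-- def parse_kegg_response(response_text: str):
--     """Staged parse: filter out blank and sectionless lines, drop stray leading
--     continuations, then recursively evaluate one whole header block at a time,
--     joining each block's pieces in one go."""
--     lines = [l for l in response_text.split('\n')
--              if l.strip() and (l.startswith(' ') or ' ' in l)]
--     while lines and lines[0].startswith(' '):
--         lines.pop(0)
--     data = {
--         'compound_id': '', 'name': '', 'formula': '', 'exact_mass': '',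
--         'molecular_weight': '', 'reactions': '', 'enzymes': '',
--         'pathways': '', 'modules': '', 'dblinks': ''
--     }
--     _parse_blocks(lines, data)
--     return data
-- ===== Notes on version B (the rewrite author's own statement) =====
-- stated objective: alternative
-- what changed: Replaces A's line-by-line current_section state machine with twin nine-branch if/elif chains by a staged parse: filter out blank/sectionless lines, then recursively consume one whole header block (header plus its indented continuation run) at a time, evaluating each block via a section table and a single join of its pieces.
import Mathlib
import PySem

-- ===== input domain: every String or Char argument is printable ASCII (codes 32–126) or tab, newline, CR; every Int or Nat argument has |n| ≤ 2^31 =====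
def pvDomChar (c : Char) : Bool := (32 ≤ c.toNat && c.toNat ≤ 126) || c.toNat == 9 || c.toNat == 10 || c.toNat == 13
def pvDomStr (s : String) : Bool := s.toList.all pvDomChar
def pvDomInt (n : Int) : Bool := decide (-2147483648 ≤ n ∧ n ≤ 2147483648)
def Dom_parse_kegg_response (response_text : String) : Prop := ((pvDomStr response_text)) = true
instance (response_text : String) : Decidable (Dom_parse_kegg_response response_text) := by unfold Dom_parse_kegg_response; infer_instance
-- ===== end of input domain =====

-- B replaces A's line-by-line current_section state machine (twin nine-branch if/elif chains)
-- by a staged parse: filter blank/sectionless lines, then recursively evaluate one whole header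
-- block at a time through a section table, joining each block's pieces once (objective: alternative).

-- ===== PORT A =====
def keggData0 : PySem.Dict String String :=
  PySem.Dict.mk [("compound_id", ""), ("name", ""), ("formula", ""), ("exact_mass", ""),
    ("molecular_weight", ""), ("reactions", ""), ("enzymes", ""), ("pathways", ""),
    ("modules", ""), ("dblinks", "")]

def keggStepA (st : PySem.Dict String String × Option String) (line : String) :
    PySem.Dict String String × Option String :=
  if PySem.Str.strip line = "" then st
  else if PySem.Str.startswith line " " then
    (if st.2 == some "NAME" then st.1.insert "name" (st.1.getD "name" "" ++ " " ++ PySem.Str.strip line)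
     else if st.2 == some "FORMULA" then st.1.insert "formula" (st.1.getD "formula" "" ++ " " ++ PySem.Str.strip line)
     else if st.2 == some "EXACT_MASS" then st.1.insert "exact_mass" (st.1.getD "exact_mass" "" ++ " " ++ PySem.Str.strip line)
     else if st.2 == some "MOL_WEIGHT" then st.1.insert "molecular_weight" (st.1.getD "molecular_weight" "" ++ " " ++ PySem.Str.strip line)
     else if st.2 == some "REACTION" then st.1.insert "reactions" (st.1.getD "reactions" "" ++ " " ++ PySem.Str.strip line)
     else if st.2 == some "ENZYME" then st.1.insert "enzymes" (st.1.getD "enzymes" "" ++ " " ++ PySem.Str.strip line)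
     else if st.2 == some "PATHWAY" then st.1.insert "pathways" (st.1.getD "pathways" "" ++ " " ++ PySem.Str.strip line)
     else if st.2 == some "MODULE" then st.1.insert "modules" (st.1.getD "modules" "" ++ " " ++ PySem.Str.strip line)
     else if st.2 == some "DBLINKS" then st.1.insert "dblinks" (st.1.getD "dblinks" "" ++ " " ++ PySem.Str.strip line)
     else st.1, st.2)
  else if PySem.Str.isIn " " line then
    match PySem.Str.splitMax? line " " 1 with
    | some (sec :: content :: _) =>
      (if sec == "ENTRY" then st.1.insert "compound_id" ((PySem.Str.split₀ content).headD "")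
       -- headD "": Python raises IndexError when content has no token; such inputs are outside Pre_
       else if sec == "NAME" then st.1.insert "name" (PySem.Str.strip content)
       else if sec == "FORMULA" then st.1.insert "formula" (PySem.Str.strip content)
       else if sec == "EXACT_MASS" then st.1.insert "exact_mass" (PySem.Str.strip content)
       else if sec == "MOL_WEIGHT" then st.1.insert "molecular_weight" (PySem.Str.strip content)
       else if sec == "REACTION" then st.1.insert "reactions" (PySem.Str.strip content)
       else if sec == "ENZYME" then st.1.insert "enzymes" (PySem.Str.strip content)
       else if sec == "PATHWAY" then st.1.insert "pathways" (PySem.Str.strip content)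
       else if sec == "MODULE" then st.1.insert "modules" (PySem.Str.strip content)
       else if sec == "DBLINKS" then st.1.insert "dblinks" (PySem.Str.strip content)
       else st.1, some sec)
    | _ => st  -- unreachable: ' ' in line guarantees two pieces
  else st

def parse_kegg_response (response_text : String) : List (String × String) :=
  (((PySem.Str.split? response_text "\n").getD []).foldl keggStepA (keggData0, none)).1.items

-- ===== PORT B =====
def keggTable : PySem.Dict String String :=
  PySem.Dict.mk [("NAME", "name"), ("FORMULA", "formula"), ("EXACT_MASS", "exact_mass"),
    ("MOL_WEIGHT", "molecular_weight"), ("REACTION", "reactions"), ("ENZYME", "enzymes"),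
    ("PATHWAY", "pathways"), ("MODULE", "modules"), ("DBLINKS", "dblinks")]

-- the line filter of Source B's list comprehension
def keggKeep (l : String) : Bool :=
  PySem.Str.strip l != "" && (PySem.Str.startswith l " " || PySem.Str.isIn " " l)

-- _parse_blocks: consume the header plus its run of indented continuation lines, recurse
def keggParseB : List String → PySem.Dict String String → PySem.Dict String String
  | [], data => data
  | header :: rest, data =>
    -- the while loop counting the continuation run
    let k := (rest.takeWhile (fun l => PySem.Str.startswith l " ")).length
    let data' :=
      match PySem.Str.splitMax? header " " 1 with
      | some (sec :: content :: _) =>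
        if sec == "ENTRY" then data.insert "compound_id" ((PySem.Str.split₀ content).headD "")
          -- headD "": Python raises IndexError when content has no token; outside Pre_
        else match keggTable.get? sec with
          | some key => data.insert key
              (PySem.Str.join " " (PySem.Str.strip content :: (rest.take k).map PySem.Str.strip))
          | none => data
      | _ => data  -- unreachable: every kept non-indented line contains ' '
    keggParseB (rest.drop k) data'
termination_by l _ => l.length
decreasing_by
  simp only [List.length_drop, List.length_cons]
  omega

def parse_kegg_response_alt (response_text : String) : List (String × String) :=
  let lines := ((PySem.Str.split? response_text "\n").getD []).filter keggKeep
  -- the pop-front while loop dropping stray leading continuation lines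
  let lines2 := lines.dropWhile (fun l => PySem.Str.startswith l " ")
  (keggParseB lines2 keggData0).items

-- ===== PRECONDITION & SPEC =====
-- Pre_ excludes exactly the inputs on which A raises IndexError: a line starting with "ENTRY "
-- whose remainder holds no non-whitespace token, so content.split()[0] indexes an empty list
-- (B raises the same IndexError there).
def Pre_parse_kegg_response (response_text : String) : Prop :=
  ∀ l ∈ (PySem.Str.split? response_text "\n").getD [],
    ¬(PySem.Str.startswith l "ENTRY " = true ∧ PySem.Str.split₀ l = ["ENTRY"])
instance (response_text : String) : Decidable (Pre_parse_kegg_response response_text) := by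
  unfold Pre_parse_kegg_response; infer_instance

def pvWitness_parse_kegg_response : String :=
  "ENTRY       C00001                      Compound\nNAME        Water;\n            H2O\nFORMULA     H2O"

def Spec_parse_kegg_response (response_text : String) (out : List (String × String)) : Prop := out = parse_kegg_response_alt response_text
instance (response_text : String) (out : List (String × String)) : Decidable (Spec_parse_kegg_response response_text out) := by unfold Spec_parse_kegg_response; infer_instance

-- ===== CLAIM (what is proved, stated in full; the proofs are below) =====
def Claim_equal_parse_kegg_response : Prop := ∀ (response_text : String), Dom_parse_kegg_response response_text → Pre_parse_kegg_response response_text → Spec_parse_kegg_response response_text (parse_kegg_response response_text)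

-- ===== LEMMAS AND PROOFS =====

-- A's step ignores lines Source B's filter drops
lemma keggStepA_id_of_not_keep (st : PySem.Dict String String × Option String) (l : String)
    (h : keggKeep l = false) : keggStepA st l = st := by
  unfold keggKeep at h
  by_cases hs : PySem.Str.strip l = ""
  · simp [keggStepA, hs]
  · simp [hs] at h
    simp [keggStepA, hs, h.1, h.2]

lemma kegg_foldl_filter (ls : List String) (st : PySem.Dict String String × Option String) :
    ls.foldl keggStepA st = (ls.filter keggKeep).foldl keggStepA st := by
  induction ls generalizing st with
  | nil => rfl
  | cons l ls ih =>
    by_cases h : keggKeep l = true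
    · simp [h, List.foldl_cons, ih]
    · simp only [Bool.not_eq_true] at h
      simp [h, List.foldl_cons, keggStepA_id_of_not_keep _ _ h, ih]

-- with no section open, A ignores continuation lines
lemma keggStepA_none (d : PySem.Dict String String) (l : String)
    (h : PySem.Str.startswith l " " = true) : keggStepA (d, none) l = (d, none) := by
  have h' : PySem.Chars.startswith l.toList [' '] = true := by simpa using h
  by_cases hs : PySem.Str.strip l = "" <;> simp [keggStepA, hs, h']

lemma kegg_foldl_none (ls : List String) (d : PySem.Dict String String)
    (h : ∀ l ∈ ls, PySem.Str.startswith l " " = true) :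
    ls.foldl keggStepA (d, none) = (d, none) := by
  induction ls with
  | nil => rfl
  | cons l ls ih =>
    rw [List.foldl_cons, keggStepA_none d l (h l (by simp)), ih fun x hx => h x (by simp [hx])]

-- the nine (section, field) pairs of the table
def keggPairs : List (String × String) :=
  [("NAME", "name"), ("FORMULA", "formula"), ("EXACT_MASS", "exact_mass"),
   ("MOL_WEIGHT", "molecular_weight"), ("REACTION", "reactions"), ("ENZYME", "enzymes"),
   ("PATHWAY", "pathways"), ("MODULE", "modules"), ("DBLINKS", "dblinks")]

lemma keggStepA_cont (sec key : String) (hmem : (sec, key) ∈ keggPairs)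
    (d : PySem.Dict String String) (l : String)
    (hsw : PySem.Str.startswith l " " = true) (hst : PySem.Str.strip l ≠ "") :
    keggStepA (d, some sec) l = (d.insert key (d.getD key "" ++ " " ++ PySem.Str.strip l), some sec) := by
  have h' : PySem.Chars.startswith l.toList [' '] = true := by simpa using hsw
  fin_cases hmem <;> simp [keggStepA, h', hst]

lemma keggStepA_other (sec : String)
    (h1 : sec ≠ "NAME") (h2 : sec ≠ "FORMULA") (h3 : sec ≠ "EXACT_MASS")
    (h4 : sec ≠ "MOL_WEIGHT") (h5 : sec ≠ "REACTION") (h6 : sec ≠ "ENZYME")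
    (h7 : sec ≠ "PATHWAY") (h8 : sec ≠ "MODULE") (h9 : sec ≠ "DBLINKS")
    (d : PySem.Dict String String) (l : String)
    (hsw : PySem.Str.startswith l " " = true) :
    keggStepA (d, some sec) l = (d, some sec) := by
  have h' : PySem.Chars.startswith l.toList [' '] = true := by simpa using hsw
  by_cases hs : PySem.Str.strip l = "" <;>
    simp [keggStepA, hs, h', h1, h2, h3, h4, h5, h6, h7, h8, h9]

lemma kegg_foldl_other (sec : String)
    (h1 : sec ≠ "NAME") (h2 : sec ≠ "FORMULA") (h3 : sec ≠ "EXACT_MASS")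
    (h4 : sec ≠ "MOL_WEIGHT") (h5 : sec ≠ "REACTION") (h6 : sec ≠ "ENZYME")
    (h7 : sec ≠ "PATHWAY") (h8 : sec ≠ "MODULE") (h9 : sec ≠ "DBLINKS")
    (ls : List String) (d : PySem.Dict String String)
    (h : ∀ l ∈ ls, PySem.Str.startswith l " " = true) :
    ls.foldl keggStepA (d, some sec) = (d, some sec) := by
  induction ls with
  | nil => rfl
  | cons l ls ih =>
    rw [List.foldl_cons,
      keggStepA_other sec h1 h2 h3 h4 h5 h6 h7 h8 h9 d l (h l (by simp)),
      ih fun x hx => h x (by simp [hx])]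

-- a continuation run under an open tabled section accumulates into its field
lemma kegg_cont_run (sec key : String) (hmem : (sec, key) ∈ keggPairs) :
    ∀ (cont : List String) (d : PySem.Dict String String) (v : String),
      (∀ l ∈ cont, PySem.Str.startswith l " " = true ∧ PySem.Str.strip l ≠ "") →
      cont.foldl keggStepA (d.insert key v, some sec) =
        (d.insert key (cont.foldl (fun acc l => acc ++ " " ++ PySem.Str.strip l) v), some sec) := by
  intro cont
  induction cont with
  | nil => intro d v _; rfl
  | cons l cont ih =>
    intro d v h
    rw [List.foldl_cons,
      keggStepA_cont sec key hmem _ l (h l (by simp)).1 (h l (by simp)).2,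
      PySem.Dict.getD_insert_self, PySem.Dict.insert_insert_self,
      ih d _ fun x hx => h x (by simp [hx]), List.foldl_cons]

-- ' '.join of a nonempty piece list is the left fold appending ' ' ++ piece
lemma kegg_join_merge (a y : String) (ys : List String) :
    PySem.Str.join " " (a :: y :: ys) = PySem.Str.join " " ((a ++ " " ++ y) :: ys) := by
  cases ys with
  | nil =>
    rw [← String.toList_inj]
    simp only [PySem.Str.toList_join, List.map_cons, List.map_nil, String.toList_append]
    rw [PySem.Chars.join_cons_cons, PySem.Chars.join_singleton, PySem.Chars.join_singleton]
  | cons z zs =>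
    rw [← String.toList_inj]
    simp only [PySem.Str.toList_join, List.map_cons, String.toList_append]
    rw [PySem.Chars.join_cons_cons, PySem.Chars.join_cons_cons, PySem.Chars.join_cons_cons]
    simp [List.append_assoc]

lemma kegg_join_foldl : ∀ (ys : List String) (a : String),
    PySem.Str.join " " (a :: ys) = ys.foldl (fun acc y => acc ++ " " ++ y) a := by
  intro ys
  induction ys with
  | nil =>
    intro a
    rw [← String.toList_inj]
    simp only [PySem.Str.toList_join, List.map_cons, List.map_nil, List.foldl_nil]
    rw [PySem.Chars.join_singleton]
  | cons y ys ih =>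
    intro a
    rw [kegg_join_merge, ih, List.foldl_cons]

-- splitOnMax.go with maxsplit exhausted returns exactly one more piece
lemma kegg_go_m0 (fuel : Nat) (l cur : List Char) (acc : List (List Char)) :
    ∃ t, PySem.Chars.splitOnMax.go [' '] fuel 0 l cur acc = acc.reverse ++ [t] := by
  match fuel, l with
  | 0, l => exact ⟨cur.reverse ++ l, by simp [PySem.Chars.splitOnMax.go]⟩
  | fuel+1, [] => exact ⟨cur.reverse, by simp [PySem.Chars.splitOnMax.go]⟩
  | fuel+1, c :: rest => exact ⟨cur.reverse ++ (c :: rest), by simp [PySem.Chars.splitOnMax.go]⟩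

-- splitOnMax.go with maxsplit 1 on a line containing ' ' returns exactly two pieces
lemma kegg_go_m1 : ∀ (fuel : Nat) (l cur : List Char) (acc : List (List Char)),
    l.length < fuel → ' ' ∈ l →
    ∃ t u, PySem.Chars.splitOnMax.go [' '] fuel 1 l cur acc = acc.reverse ++ [t, u] := by
  intro fuel
  induction fuel with
  | zero => intro l cur acc h _; exact absurd h (Nat.not_lt_zero _)
  | succ fuel ih =>
    intro l cur acc hlen hmem
    cases l with
    | nil => simp at hmem
    | cons ch rest =>
      by_cases hp : [' '].isPrefixOf (ch :: rest) = true
      · obtain ⟨t, ht⟩ := kegg_go_m0 fuel rest [] (cur.reverse :: acc)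
        refine ⟨cur.reverse, t, ?_⟩
        rw [show PySem.Chars.splitOnMax.go [' '] (fuel+1) 1 (ch :: rest) cur acc
             = PySem.Chars.splitOnMax.go [' '] fuel 0 ((ch :: rest).drop 1) [] (cur.reverse :: acc) from by
           simp [PySem.Chars.splitOnMax.go, hp]]
        simp [ht]
      · have hch : ch ≠ ' ' := by
          intro h; subst h; exact hp (by simp [List.isPrefixOf])
        have hmem' : ' ' ∈ rest := by
          rcases List.mem_cons.mp hmem with h | h
          · exact absurd h.symm hch
          · exact h
        have hlen' : rest.length < fuel := by simp at hlen; omega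
        obtain ⟨t, u, htu⟩ := ih rest (ch :: cur) acc hlen' hmem'
        refine ⟨t, u, ?_⟩
        rw [show PySem.Chars.splitOnMax.go [' '] (fuel+1) 1 (ch :: rest) cur acc
             = PySem.Chars.splitOnMax.go [' '] fuel 1 rest (ch :: cur) acc from by
           simp [PySem.Chars.splitOnMax.go, hp]]
        exact htu

-- ' ' in line ⇒ line.split(' ', 1) yields exactly two pieces
lemma kegg_split_two (l : String) (h : PySem.Str.isIn " " l = true) :
    ∃ sec content, PySem.Str.splitMax? l " " 1 = some [sec, content] := by
  have hmem : ' ' ∈ l.toList := by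
    have hinf := (PySem.Str.isIn_iff_infix _ _).mp h
    have : (" " : String).toList = [' '] := rfl
    rw [this] at hinf
    exact hinf.subset (by simp)
  obtain ⟨t, u, htu⟩ := kegg_go_m1 (l.toList.length + 1) l.toList [] [] (by omega) hmem
  refine ⟨String.ofList t, String.ofList u, ?_⟩
  unfold PySem.Str.splitMax? PySem.Chars.splitMax?
  have hsep : (" " : String).toList = [' '] := rfl
  have hval : PySem.Chars.splitOnMax l.toList [' '] 1 = [t, u] := by
    unfold PySem.Chars.splitOnMax
    norm_num
    simpa using htu
  simp [hsep, hval]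

-- the value A's header branch writes, as one function of (section, content)
def keggHeaderA (d : PySem.Dict String String) (sec content : String) : PySem.Dict String String :=
  if sec == "ENTRY" then d.insert "compound_id" ((PySem.Str.split₀ content).headD "")
  else if sec == "NAME" then d.insert "name" (PySem.Str.strip content)
  else if sec == "FORMULA" then d.insert "formula" (PySem.Str.strip content)
  else if sec == "EXACT_MASS" then d.insert "exact_mass" (PySem.Str.strip content)
  else if sec == "MOL_WEIGHT" then d.insert "molecular_weight" (PySem.Str.strip content)
  else if sec == "REACTION" then d.insert "reactions" (PySem.Str.strip content)
  else if sec == "ENZYME" then d.insert "enzymes" (PySem.Str.strip content)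
  else if sec == "PATHWAY" then d.insert "pathways" (PySem.Str.strip content)
  else if sec == "MODULE" then d.insert "modules" (PySem.Str.strip content)
  else if sec == "DBLINKS" then d.insert "dblinks" (PySem.Str.strip content)
  else d

lemma keggTable_mem (sec key : String) (h : keggTable.get? sec = some key) :
    (sec, key) ∈ keggPairs := by
  unfold keggTable at h
  simp only [PySem.Dict.get?_mk_cons] at h
  split_ifs at h with h1 h2 h3 h4 h5 h6 h7 h8 h9 <;> simp_all [keggPairs, PySem.Dict.get?]

lemma keggTable_none (sec : String) (h : keggTable.get? sec = none) :
    sec ≠ "NAME" ∧ sec ≠ "FORMULA" ∧ sec ≠ "EXACT_MASS" ∧ sec ≠ "MOL_WEIGHT" ∧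
    sec ≠ "REACTION" ∧ sec ≠ "ENZYME" ∧ sec ≠ "PATHWAY" ∧ sec ≠ "MODULE" ∧ sec ≠ "DBLINKS" := by
  unfold keggTable at h
  simp only [PySem.Dict.get?_mk_cons] at h
  split_ifs at h with h1 h2 h3 h4 h5 h6 h7 h8 h9
  all_goals simp_all
  exact ⟨fun e => h1 (by simp [e]), fun e => h2 (by simp [e]), fun e => h3 (by simp [e]),
    fun e => h4 (by simp [e]), fun e => h5 (by simp [e]), fun e => h6 (by simp [e]),
    fun e => h7 (by simp [e]), fun e => h8 (by simp [e]), fun e => h9 (by simp [e])⟩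

-- takeWhile / take and dropWhile / drop agree at the takeWhile length
lemma kegg_take_eq (p : String → Bool) (rest : List String) :
    rest.take (rest.takeWhile p).length = rest.takeWhile p := by
  obtain ⟨t, ht⟩ := List.takeWhile_prefix (l := rest) p
  have key : ∀ (a u : List String), rest = a ++ u → rest.take a.length = a := by
    intro a u h; rw [h]; exact List.take_left ..
  exact key _ _ ht.symm

lemma kegg_drop_eq (p : String → Bool) (rest : List String) :
    rest.drop (rest.takeWhile p).length = rest.dropWhile p := by
  have h1 := List.take_append_drop (rest.takeWhile p).length rest
  rw [kegg_take_eq] at h1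
  exact List.append_cancel_left (h1.trans (List.takeWhile_append_dropWhile (p := p) (l := rest)).symm)

-- the main block lemma: A's fold over a kept, header-led line list equals B's block recursion
lemma kegg_main : ∀ (n : Nat) (lines : List String) (d : PySem.Dict String String) (c : Option String),
    lines.length ≤ n →
    (∀ l ∈ lines, keggKeep l = true) →
    (∀ h, lines.head? = some h → PySem.Str.startswith h " " = false) →
    (lines.foldl keggStepA (d, c)).1 = keggParseB lines d := by
  intro n
  induction n with
  | zero =>
    intro lines d c hlen _ _
    rw [List.eq_nil_of_length_eq_zero (Nat.le_zero.mp hlen), keggParseB]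
    rfl
  | succ n ih =>
    intro lines d c hlen hk hh
    cases lines with
    | nil => rw [keggParseB]; rfl
    | cons header rest =>
      have hsw : PySem.Str.startswith header " " = false := hh header rfl
      have hkeep := hk header (by simp)
      unfold keggKeep at hkeep
      rw [hsw] at hkeep
      simp only [Bool.false_or, bne_iff_ne, ne_eq, Bool.and_eq_true] at hkeep
      obtain ⟨hst, hin⟩ := hkeep
      obtain ⟨sec, content, hsp⟩ := kegg_split_two header hin
      have hsw' : PySem.Chars.startswith header.toList [' '] = false := by simpa using hsw
      have hin' : PySem.Chars.isIn [' '] header.toList = true := by simpa using hin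
      have hcontP : ∀ l ∈ rest.takeWhile (fun l => PySem.Str.startswith l " "),
          PySem.Str.startswith l " " = true := fun l hl => by
        simpa using List.mem_takeWhile_imp hl
      have hcontS : ∀ l ∈ rest.takeWhile (fun l => PySem.Str.startswith l " "),
          PySem.Str.strip l ≠ "" := by
        intro l hl
        have hmem : l ∈ rest := (List.takeWhile_prefix _).subset hl
        have := hk l (by simp [hmem])
        unfold keggKeep at this
        intro hc
        rw [hc] at this
        simp at this
      have hdrop_keep : ∀ l ∈ rest.dropWhile (fun l => PySem.Str.startswith l " "),
          keggKeep l = true := fun l hl =>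
        hk l (by simp [(List.dropWhile_suffix _).subset hl])
      have hdrop_head : ∀ x, (rest.dropWhile (fun l => PySem.Str.startswith l " ")).head? = some x →
          PySem.Str.startswith x " " = false := by
        intro x hx
        have h2 := List.head?_dropWhile_not (fun l => PySem.Str.startswith l " ") rest
        rw [hx] at h2
        simpa using h2
      have hdlen : (rest.dropWhile (fun l => PySem.Str.startswith l " ")).length ≤ n := by
        have := List.length_dropWhile_le (fun l => PySem.Str.startswith l " ") rest
        simp at hlen
        omega
      have hA : keggStepA (d, c) header = (keggHeaderA d sec content, some sec) := by
        simp [keggStepA, hst, hsw', hin', hsp, keggHeaderA]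
      have hrest : rest = rest.takeWhile (fun l => PySem.Str.startswith l " ")
          ++ rest.dropWhile (fun l => PySem.Str.startswith l " ") :=
        (List.takeWhile_append_dropWhile).symm
      rw [keggParseB, List.foldl_cons, hA]
      conv_lhs => rw [hrest, List.foldl_append]
      simp only [kegg_take_eq, kegg_drop_eq, hsp]
      by_cases hE : sec = "ENTRY"
      · subst hE
        rw [kegg_foldl_other "ENTRY" (by decide) (by decide) (by decide) (by decide) (by decide)
          (by decide) (by decide) (by decide) (by decide) _ _ hcontP,
          ih _ _ _ hdlen hdrop_keep hdrop_head]
        simp [keggHeaderA]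
      · cases htab : keggTable.get? sec with
        | some key =>
          have hmem := keggTable_mem sec key htab
          have hAH : keggHeaderA d sec content = d.insert key (PySem.Str.strip content) := by
            fin_cases hmem <;> simp [keggHeaderA]
          rw [hAH, kegg_cont_run sec key hmem _ d _ (fun l hl => ⟨hcontP l hl, hcontS l hl⟩)]
          rw [ih _ _ _ hdlen hdrop_keep hdrop_head]
          rw [kegg_join_foldl, List.foldl_map]
          simp [hE]
        | none =>
          obtain ⟨h1, h2, h3, h4, h5, h6, h7, h8, h9⟩ := keggTable_none sec htab
          rw [kegg_foldl_other sec h1 h2 h3 h4 h5 h6 h7 h8 h9 _ _ hcontP]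
          rw [ih _ _ _ hdlen hdrop_keep hdrop_head]
          have hd : keggHeaderA d sec content = d := by
            simp [keggHeaderA, hE, h1, h2, h3, h4, h5, h6, h7, h8, h9]
          rw [hd]
          simp [hE]

-- ===== VERDICT (by name: the statement is the Claim_ definition above) =====
theorem parse_kegg_response_spec : Claim_equal_parse_kegg_response := by
  intro rt _ _
  unfold Spec_parse_kegg_response parse_kegg_response parse_kegg_response_alt
  rw [kegg_foldl_filter]
  have hsplit := (List.takeWhile_append_dropWhile
    (p := fun l => PySem.Str.startswith l " ")
    (l := ((PySem.Str.split? rt "\n").getD []).filter keggKeep)).symm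
  conv_lhs => rw [hsplit, List.foldl_append]
  rw [kegg_foldl_none _ _ (fun l hl => by simpa using List.mem_takeWhile_imp hl)]
  have hdk : ∀ l ∈ (((PySem.Str.split? rt "\n").getD []).filter keggKeep).dropWhile
      (fun l => PySem.Str.startswith l " "), keggKeep l = true := fun l hl =>
    List.of_mem_filter ((List.dropWhile_suffix _).subset hl)
  have hdh : ∀ x, ((((PySem.Str.split? rt "\n").getD []).filter keggKeep).dropWhile
      (fun l => PySem.Str.startswith l " ")).head? = some x →
      PySem.Str.startswith x " " = false := by
    intro x hx
    have h2 := List.head?_dropWhile_not (fun l => PySem.Str.startswith l " ")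
      (((PySem.Str.split? rt "\n").getD []).filter keggKeep)
    rw [hx] at h2
    simpa using h2
  rw [kegg_main _ _ keggData0 none le_rfl hdk hdh]
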